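-- pv_equiv track=rewrite | github.com/klh269/Renzo-UROP | utils_analysis/extract_ft.py | split_signs
-- ===== SOURCE A (Python) =====
-- def split_signs(arr):
--     """
--     Split array into positive and negative segments and extract their indices.
--     E.g. Input = [1, 2, -1, 2, 3, 4, -3, -4, 5, 6];
--     Returns [[0, 1], [2], [3, 4, 5], [6, 7], [8, 9]].
--     """
--     split_idx = []
--     idx_pos, idx_neg = [], []
--
--     for i in range(len(arr)):
--         if arr[i] > 0:
--             if len(idx_neg) > 0:
--                 split_idx.append(idx_neg)
--                 idx_neg = []
--             idx_pos.append(i)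
--         elif arr[i] < 0:
--             if len(idx_pos) > 0:
--                 split_idx.append(idx_pos)
--                 idx_pos = []
--             idx_neg.append(i)
--
--     # Append remaining segment.
--     if len(idx_pos) > 0:
--         split_idx.append(idx_pos)
--     if len(idx_neg) > 0:
--         split_idx.append(idx_neg)
--
--     return split_idx
-- ===== SOURCE B (Python) =====
-- def split_signs(arr):
--     """
--     Split array into positive and negative segments and extract their indices.
--     Decomposition: first collect the nonzero (index, sign) pairs, then split
--     that list into maximal runs of equal sign by repeatedly peeling the
--     leading run off the remaining suffix.
--     """
--     pairs = [(i, x > 0) for i, x in enumerate(arr) if x > 0 or x < 0]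
--
--     out = []
--     ps = pairs
--     while ps:
--         key = ps[0][1]
--         j = 1
--         while j < len(ps) and ps[j][1] == key:
--             j += 1
--         out.append([i for i, _ in ps[:j]])
--         ps = ps[j:]
--     return out
-- ===== Notes on version B (the rewrite author's own statement) =====
-- stated objective: alternative
-- what changed: B first materialises the nonzero (index, sign) pairs in one comprehension and then recursively splits that pair list into maximal equal-sign runs, instead of A's single stateful loop that maintains and flushes two parallel index buffers.
import Mathlib
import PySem

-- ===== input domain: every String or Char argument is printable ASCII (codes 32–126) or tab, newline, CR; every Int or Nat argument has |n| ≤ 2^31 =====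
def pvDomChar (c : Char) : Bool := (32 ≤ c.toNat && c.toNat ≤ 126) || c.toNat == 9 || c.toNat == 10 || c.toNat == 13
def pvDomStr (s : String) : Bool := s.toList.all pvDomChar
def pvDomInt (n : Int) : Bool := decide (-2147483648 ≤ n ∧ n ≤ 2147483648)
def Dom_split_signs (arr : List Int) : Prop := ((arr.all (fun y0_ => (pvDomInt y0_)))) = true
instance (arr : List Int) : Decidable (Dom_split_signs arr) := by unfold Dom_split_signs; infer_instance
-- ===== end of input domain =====

-- B restructures A: one pass collecting nonzero (index, sign) pairs, then recursive
-- splitting of that list into maximal equal-sign runs (alternative decomposition, same cost).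

-- ===== PORT A =====
-- loop body of A: state = (split_idx, idx_pos, idx_neg), element q = (i, arr[i])
def sgStepA (st : List (List Int) × List Int × List Int) (q : Int × Int) :
    List (List Int) × List Int × List Int :=
  if q.2 > 0 then
    if st.2.2.length > 0 then (st.1 ++ [st.2.2], st.2.1 ++ [q.1], [])
    else (st.1, st.2.1 ++ [q.1], st.2.2)
  else if q.2 < 0 then
    if st.2.1.length > 0 then (st.1 ++ [st.2.1], [], st.2.2 ++ [q.1])
    else (st.1, st.2.1, st.2.2 ++ [q.1])
  else st

-- tail of A: append remaining segments
def sgFinish (st : List (List Int) × List Int × List Int) : List (List Int) :=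
  let s := if st.2.1.length > 0 then st.1 ++ [st.2.1] else st.1
  if st.2.2.length > 0 then s ++ [st.2.2] else s

def split_signs (arr : List Int) : List (List Int) :=
  -- for i in range(len(arr)): … arr[i] …  (i is always in range, so the pyGetD default is never used)
  sgFinish ((PySem.List.pyRange 0 arr.length 1).foldl
    (fun st i => sgStepA st (i, PySem.List.pyGetD arr i 0)) ([], [], []))

-- ===== PORT B =====
-- groups(ps): peel the maximal prefix with the same sign key as ps[0], recurse on the rest
def sgGroups : List (Int × Bool) → List (List Int)
  | [] => []
  | p :: ps =>
      ((p :: ps.takeWhile (fun q => q.2 == p.2)).map Prod.fst)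
        :: sgGroups (ps.dropWhile (fun q => q.2 == p.2))
termination_by l => l.length
decreasing_by
  simpa [List.length_cons] using Nat.lt_succ_of_le (List.length_dropWhile_le _ _)

def split_signs_alt (arr : List Int) : List (List Int) :=
  sgGroups (((PySem.List.enumerate arr 0).filter
      (fun q => decide (q.2 > 0) || decide (q.2 < 0))).map
    (fun q => (q.1, decide (q.2 > 0))))

-- ===== PRECONDITION & SPEC =====
def Spec_split_signs (arr : List Int) (out : List (List Int)) : Prop := out = split_signs_alt arr
instance (arr : List Int) (out : List (List Int)) : Decidable (Spec_split_signs arr out) := by unfold Spec_split_signs; infer_instance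

-- ===== CLAIM (what is proved, stated in full; the proofs are below) =====
def Claim_equal_split_signs : Prop := ∀ (arr : List Int), Dom_split_signs arr → Spec_split_signs arr (split_signs arr)

-- ===== LEMMAS AND PROOFS =====

-- the sign-pair list both sides reduce to
def sgPairs (l : List (Int × Int)) : List (Int × Bool) :=
  (l.filter (fun q => decide (q.2 > 0) || decide (q.2 < 0))).map (fun q => (q.1, decide (q.2 > 0)))

-- A's loop body, restated on sign pairs
def sgStepP (st : List (List Int) × List Int × List Int) (q : Int × Bool) :
    List (List Int) × List Int × List Int :=
  if q.2 then
    if st.2.2.length > 0 then (st.1 ++ [st.2.2], st.2.1 ++ [q.1], [])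
    else (st.1, st.2.1 ++ [q.1], st.2.2)
  else
    if st.2.1.length > 0 then (st.1 ++ [st.2.1], [], st.2.2 ++ [q.1])
    else (st.1, st.2.1, st.2.2 ++ [q.1])

lemma sgGroups_nil : sgGroups [] = [] := by rw [sgGroups]

lemma sgGroups_cons (p : Int × Bool) (ps : List (Int × Bool)) :
    sgGroups (p :: ps) = ((p :: ps.takeWhile (fun q => q.2 == p.2)).map Prod.fst)
      :: sgGroups (ps.dropWhile (fun q => q.2 == p.2)) := by rw [sgGroups]

lemma foldA_eq_foldP (l : List (Int × Int)) (st : List (List Int) × List Int × List Int) :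
    l.foldl sgStepA st = (sgPairs l).foldl sgStepP st := by
  induction l generalizing st with
  | nil => rfl
  | cons q l ih =>
      rcases q with ⟨i, x⟩
      rw [List.foldl_cons]
      by_cases hp : x > 0
      · have hs : sgStepA st (i, x) = sgStepP st (i, true) := by
          simp [sgStepA, sgStepP, hp]
        rw [hs, ih]
        simp [sgPairs, hp]
      · by_cases hn : x < 0
        · have hs : sgStepA st (i, x) = sgStepP st (i, false) := by
            simp [sgStepA, sgStepP, hp, hn]
          rw [hs, ih]
          simp [sgPairs, hp, hn]
        · have hs : sgStepA st (i, x) = st := by simp [sgStepA, hp, hn]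
          rw [hs, ih]
          simp [sgPairs, hp, hn]

lemma foldP_run (ps : List (Int × Bool)) (s : List (List Int)) (run : List Int) (k : Bool)
    (h : run ≠ []) :
    sgFinish (ps.foldl sgStepP (s, if k then run else [], if k then [] else run)) =
      s ++ ((run ++ (ps.takeWhile (fun q => q.2 == k)).map Prod.fst)
        :: sgGroups (ps.dropWhile (fun q => q.2 == k))) := by
  induction ps generalizing s run k with
  | nil =>
      cases k <;>
        simp [sgFinish, sgGroups_nil, List.length_pos_iff, h]
  | cons q ps ih =>
      rcases q with ⟨j, k'⟩
      by_cases hk : k' = k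
      · subst hk
        have step : sgStepP (s, if k' then run else [], if k' then [] else run) (j, k')
            = (s, if k' then run ++ [j] else [], if k' then [] else run ++ [j]) := by
          cases k' <;> simp [sgStepP]
        rw [List.foldl_cons, step, ih s (run ++ [j]) k' (by simp)]
        simp [List.takeWhile, List.dropWhile]
      · have step : sgStepP (s, if k then run else [], if k then [] else run) (j, k')
            = (s ++ [run], if k' then [j] else [], if k' then [] else [j]) := by
          cases k <;> cases k' <;> simp_all [sgStepP, List.length_pos_iff]
        rw [List.foldl_cons, step, ih (s ++ [run]) [j] k' (by simp)]
        have hbk : (k' == k) = false := by cases k <;> cases k' <;> simp_all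
        simp [List.takeWhile, List.dropWhile, hbk, sgGroups_cons]
      -- (the k' ≠ k case flips the open run into the output and opens a new one-element run)

lemma foldP_zero (ps : List (Int × Bool)) (s : List (List Int)) :
    sgFinish (ps.foldl sgStepP (s, [], [])) = s ++ sgGroups ps := by
  cases ps with
  | nil => simp [sgFinish, sgGroups_nil]
  | cons q ps =>
      rcases q with ⟨j, k⟩
      have step : sgStepP (s, [], []) (j, k)
          = (s, if k then [j] else [], if k then [] else [j]) := by
        cases k <;> simp [sgStepP]
      rw [List.foldl_cons, step, foldP_run ps s [j] k (by simp), sgGroups_cons]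
      simp

-- ===== VERDICT (by name: the statement is the Claim_ definition above) =====
theorem split_signs_spec : Claim_equal_split_signs := by
  intro arr _
  show split_signs arr = split_signs_alt arr
  unfold split_signs split_signs_alt
  have e : PySem.List.enumerate arr 0
      = (PySem.List.pyRange 0 (arr.length : Int) 1).map
          (fun j => (j, PySem.List.pyGetD arr j 0)) := by
    simpa [PySem.List.len] using PySem.List.enumerate_eq_map_pyRange (d := (0 : Int)) arr
  have e2 : (PySem.List.pyRange 0 (arr.length : Int) 1).foldl
      (fun st i => sgStepA st (i, PySem.List.pyGetD arr i 0))
      (([], [], []) : List (List Int) × List Int × List Int)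
      = (PySem.List.enumerate arr 0).foldl sgStepA ([], [], []) := by
    rw [e, List.foldl_map]
  rw [e2, foldA_eq_foldP]
  simpa [sgPairs] using foldP_zero (sgPairs (PySem.List.enumerate arr 0)) []
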